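-- pv_equiv track=rewrite | github.com/elfakyn/scp_epub | scp_epub/process/page_gimmicks.py | get_page_fragment_mapping
-- ===== SOURCE A (Python) =====
-- def get_page_fragment_mapping(fragment_list):
--     mapping = {}
--     for fragment in fragment_list:
--         if fragment['parent_fullname'] is None:
--             continue
--         if fragment['parent_fullname'] in mapping:
--             mapping[fragment['parent_fullname']].append(fragment['fullname'])
--         else:
--             mapping[fragment['parent_fullname']] = [fragment['fullname']]
--
--     return mapping
-- ===== SOURCE B (Python) =====
-- def get_page_fragment_mapping(fragment_list):
--     pairs = [(fragment['parent_fullname'], fragment['fullname'])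
--              for fragment in fragment_list
--              if fragment['parent_fullname'] is not None]
--     mapping = {}
--     for parent in dict.fromkeys(parent for parent, _ in pairs):
--         mapping[parent] = [child for p, child in pairs if p == parent]
--     return mapping
-- ===== Notes on version B (the rewrite author's own statement) =====
-- stated objective: alternative
-- what changed: A builds the dict incrementally in one pass with per-key append/insert branching; B first flattens to a (parent, fullname) pair list, dedupes the parents in first-appearance order, and builds each group by a filtering comprehension over the pair list.
-- outside the precondition, e.g. on get_page_fragment_mapping([{'parent_fullname': 'p'}]): A raises KeyError, B raises KeyError; on get_page_fragment_mapping([{'parent_fullname': 'p', 'fullname': None}]): A returns {'p': [None]}, B returns {'p': [None]}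
import Mathlib
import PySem

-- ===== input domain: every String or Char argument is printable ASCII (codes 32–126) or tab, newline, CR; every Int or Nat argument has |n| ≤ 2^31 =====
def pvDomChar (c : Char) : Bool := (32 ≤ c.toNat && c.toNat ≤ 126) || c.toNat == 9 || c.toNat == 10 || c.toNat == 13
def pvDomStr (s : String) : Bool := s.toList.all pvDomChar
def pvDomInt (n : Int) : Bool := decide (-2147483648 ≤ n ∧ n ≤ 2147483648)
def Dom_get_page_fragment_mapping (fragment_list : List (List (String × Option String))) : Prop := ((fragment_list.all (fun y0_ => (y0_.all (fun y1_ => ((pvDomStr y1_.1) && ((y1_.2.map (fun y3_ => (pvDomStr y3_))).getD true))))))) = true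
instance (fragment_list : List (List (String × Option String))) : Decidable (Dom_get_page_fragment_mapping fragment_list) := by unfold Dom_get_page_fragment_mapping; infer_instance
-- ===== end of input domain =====

-- B replaces A's incremental dict building by flatten-to-pairs + dedup parents + group-by-filter (alternative decomposition, same return value).

-- ===== PORT A =====
-- fragment['parent_fullname'] (KeyError, i.e. missing key, excluded by Pre_)
def pvParent (frag : List (String × Option String)) : Option String :=
  ((PySem.Dict.mk frag).get? "parent_fullname").getD none
-- fragment['fullname'] (missing or None excluded by Pre_ when it is reached)
def pvFull (frag : List (String × Option String)) : String :=
  (((PySem.Dict.mk frag).get? "fullname").getD none).getD ""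

def get_page_fragment_mapping (fragment_list : List (List (String × Option String))) : List (String × List String) :=
  (fragment_list.foldl (fun mapping frag =>
      match pvParent frag with
      | none => mapping
      | some p =>
        if mapping.contains p then mapping.modify p [] (fun l => l ++ [pvFull frag])
        else mapping.insert p [pvFull frag])
    PySem.Dict.empty).items

-- ===== PORT B =====
def get_page_fragment_mapping_alt (fragment_list : List (List (String × Option String))) : List (String × List String) :=
  let pairs := (fragment_list.filter (fun f => (pvParent f).isSome)).map
      (fun f => ((pvParent f).getD "", pvFull f))
  (PySem.List.dedup (pairs.map (·.1))).map
      (fun p => (p, (pairs.filter (fun q => q.1 == p)).map (·.2)))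

-- ===== PRECONDITION & SPEC =====
-- Pre_ excludes fragments where A raises KeyError (missing 'parent_fullname', or missing
-- 'fullname' on a kept fragment) and fragments with a non-None parent but fullname None,
-- on which A returns a dict whose value list contains None, not a value of the declared type.
def Pre_get_page_fragment_mapping (fragment_list : List (List (String × Option String))) : Prop :=
  ∀ f ∈ fragment_list,
    ((PySem.Dict.mk f).get? "parent_fullname").isSome = true ∧
    (((PySem.Dict.mk f).get? "parent_fullname").getD none ≠ none →
      (((PySem.Dict.mk f).get? "fullname").getD none).isSome = true)
instance (fragment_list : List (List (String × Option String))) : Decidable (Pre_get_page_fragment_mapping fragment_list) := by unfold Pre_get_page_fragment_mapping; infer_instance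

def pvWitness_get_page_fragment_mapping : (List (List (String × Option String))) :=
  [[("parent_fullname", some "p"), ("fullname", some "c")],
   [("parent_fullname", none), ("fullname", some "x")],
   [("parent_fullname", some "p"), ("fullname", some "d")]]

def Spec_get_page_fragment_mapping (fragment_list : List (List (String × Option String))) (out : List (String × List String)) : Prop := out = get_page_fragment_mapping_alt fragment_list
instance (fragment_list : List (List (String × Option String))) (out : List (String × List String)) : Decidable (Spec_get_page_fragment_mapping fragment_list out) := by unfold Spec_get_page_fragment_mapping; infer_instance

-- ===== CLAIM (what is proved, stated in full; the proofs are below) =====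
def Claim_equal_get_page_fragment_mapping : Prop := ∀ (fragment_list : List (List (String × Option String))), Dom_get_page_fragment_mapping fragment_list → Pre_get_page_fragment_mapping fragment_list → Spec_get_page_fragment_mapping fragment_list (get_page_fragment_mapping fragment_list)

-- ===== LEMMAS AND PROOFS =====

-- A's if/else branch is one dict 'modify' (modify inserts f(dflt) when the key is absent).
theorem pv_branch_eq (d : PySem.Dict String (List String)) (p : String) (c : String) :
    (if d.contains p then d.modify p [] (fun l => l ++ [c]) else d.insert p [c]) =
      d.modify p [] (fun l => l ++ [c]) := by
  unfold PySem.Dict.modify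
  split_ifs with h
  · rfl
  · rw [PySem.Dict.getD_of_not_contains d [] (by simpa using h)]
    simp

-- A's loop body as a function equals the single-'modify' form.
theorem pv_step_eq :
    (fun (mapping : PySem.Dict String (List String)) frag =>
      match pvParent frag with
      | none => mapping
      | some p =>
        if mapping.contains p then mapping.modify p [] (fun l => l ++ [pvFull frag])
        else mapping.insert p [pvFull frag]) =
    (fun (mapping : PySem.Dict String (List String)) frag =>
      match pvParent frag with
      | none => mapping
      | some p => mapping.modify p [] (fun l => l ++ [pvFull frag])) := by
  funext d f
  cases hp : pvParent f with
  | none => rfl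
  | some p => simp only [pv_branch_eq]

-- A's loop over fragments equals the same modify-loop over B's pair list.
theorem pv_fold_pairs (fl : List (List (String × Option String)))
    (d : PySem.Dict String (List String)) :
    fl.foldl (fun mapping frag =>
      match pvParent frag with
      | none => mapping
      | some p => mapping.modify p [] (fun l => l ++ [pvFull frag])) d =
    ((fl.filter (fun f => (pvParent f).isSome)).map
        (fun f => ((pvParent f).getD "", pvFull f))).foldl
      (fun d q => d.modify q.1 [] (fun l => l ++ [q.2])) d := by
  induction fl generalizing d with
  | nil => rfl
  | cons f fl ih =>
    cases hp : pvParent f with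
    | none => simp [List.foldl, hp, List.filter, ih]
    | some p => simp [List.foldl, hp, ih]

-- ===== VERDICT (by name: the statement is the Claim_ definition above) =====
theorem get_page_fragment_mapping_spec : Claim_equal_get_page_fragment_mapping := by
  intro fl _ _
  unfold Spec_get_page_fragment_mapping get_page_fragment_mapping get_page_fragment_mapping_alt
  rw [pv_step_eq, pv_fold_pairs]
  set ps := (fl.filter (fun f => (pvParent f).isSome)).map
      (fun f => ((pvParent f).getD "", pvFull f)) with hps
  have hnd : (ps.foldl (fun d q => d.modify q.1 [] (fun l => l ++ [q.2]))
      (PySem.Dict.empty : PySem.Dict String (List String))).keys.Nodup :=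
    PySem.Dict.nodup_keys_foldl_modify_key _ _ _ _ _ (by simp [PySem.Dict.keys_empty])
  rw [PySem.Dict.items_eq_map_keys _ hnd []]
  have hk : (ps.foldl (fun d q => d.modify q.1 [] (fun l => l ++ [q.2]))
      (PySem.Dict.empty : PySem.Dict String (List String))).keys
      = PySem.List.dedup (ps.map (·.1)) := by
    rw [PySem.Dict.keys_foldl_modify_key]
    simp [PySem.Dict.keys_empty, PySem.Set.update, PySem.Set.ofList]
  have hg : ∀ c, (ps.foldl (fun d q => d.modify q.1 [] (fun l => l ++ [q.2]))
      (PySem.Dict.empty : PySem.Dict String (List String))).getD c []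
      = (ps.filter (fun q => q.1 == c)).map (·.2) := by
    intro c
    rw [PySem.Dict.getD_foldl_modify_append]
    simp [PySem.Dict.getD_empty]
  rw [hk]
  simp only [hg]
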